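-- pv_equiv track=rewrite | github.com/Saebest/Kassenzettelleser | Python/PythonProject/KassenzettelFunctions.py | other_items_within_range
-- ===== SOURCE A (Python) =====
-- def other_items_within_range(list,item,range):
--     indexOfItem = list.index(item)
--     i = indexOfItem-range
--     output=[]
--     while i <= (indexOfItem + range):
--         if 0 <= i < len(list) and not i == indexOfItem:
--             output.append(list[i])
--
--         i += 1
--     return output
-- ===== SOURCE B (Python) =====
-- def other_items_within_range(list, item, range):
--     idx = list.index(item)
--     if range <= 0:
--         return []
--     lo = idx - range
--     if lo < 0:
--         lo = 0
--     return list[lo:idx] + list[idx + 1:idx + range + 1]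
-- ===== Notes on version B (the rewrite author's own statement) =====
-- stated objective: simpler
-- what changed: Replaces the per-index while-loop with bounds tests by two direct list slices (left and right window around the found index), with an early empty return for non-positive range.
import Mathlib
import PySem

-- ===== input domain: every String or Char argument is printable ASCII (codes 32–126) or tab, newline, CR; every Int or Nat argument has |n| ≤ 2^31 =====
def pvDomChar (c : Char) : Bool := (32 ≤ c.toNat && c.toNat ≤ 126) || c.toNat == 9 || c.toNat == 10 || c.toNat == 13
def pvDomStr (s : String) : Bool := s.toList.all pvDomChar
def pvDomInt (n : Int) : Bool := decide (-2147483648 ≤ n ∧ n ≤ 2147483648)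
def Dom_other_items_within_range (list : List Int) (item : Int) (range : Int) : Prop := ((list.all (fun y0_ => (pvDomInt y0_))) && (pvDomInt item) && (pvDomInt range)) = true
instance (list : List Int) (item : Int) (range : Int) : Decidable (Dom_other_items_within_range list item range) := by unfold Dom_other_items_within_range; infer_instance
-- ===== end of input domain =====

-- B replaces A's per-index while-loop by two direct slices around the found index (simpler).

-- ===== PORT A =====
-- A: idx = list.index(item) (ValueError if missing → Pre_); then a while-loop
-- for i from idx-range to idx+range collecting in-bounds elements other than list[idx].
-- The guard makes the index in range, so list[i] is ported as pyGetD (exact there).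
def other_items_within_range (list : List Int) (item : Int) (range : Int) : List Int :=
  match PySem.List.index? list item with
  | none => []   -- unreachable under Pre_ (Python raises ValueError)
  | some k =>
    let indexOfItem : Int := (k : Int)
    (PySem.List.pyRange (indexOfItem - range) (indexOfItem + range + 1) 1).foldl
      (fun output i =>
        if 0 ≤ i ∧ i < (list.length : Int) ∧ ¬ i = indexOfItem then
          output ++ [PySem.List.pyGetD list i 0]
        else output) []

-- ===== PORT B =====
def other_items_within_range_alt (list : List Int) (item : Int) (range : Int) : List Int :=
  match PySem.List.index? list item with
  | none => []   -- unreachable under Pre_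
  | some k =>
    let idx : Int := (k : Int)
    if range ≤ 0 then []
    else
      let lo : Int := if idx - range < 0 then 0 else idx - range
      PySem.List.slice list (some lo) (some idx) ++
        PySem.List.slice list (some (idx + 1)) (some (idx + range + 1))

-- ===== PRECONDITION & SPEC =====
-- Pre_ excludes exactly the inputs where Python's list.index raises ValueError.
def Pre_other_items_within_range (list : List Int) (item : Int) (range : Int) : Prop :=
  item ∈ list
instance (list : List Int) (item : Int) (range : Int) : Decidable (Pre_other_items_within_range list item range) := by unfold Pre_other_items_within_range; infer_instance

def pvWitness_other_items_within_range : List Int × Int × Int := ([1, 2, 3], 2, 1)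

def Spec_other_items_within_range (list : List Int) (item : Int) (range : Int) (out : List Int) : Prop := out = other_items_within_range_alt list item range
instance (list : List Int) (item : Int) (range : Int) (out : List Int) : Decidable (Spec_other_items_within_range list item range out) := by unfold Spec_other_items_within_range; infer_instance

-- ===== CLAIM (what is proved, stated in full; the proofs are below) =====
def Claim_equal_other_items_within_range : Prop := ∀ (list : List Int) (item : Int) (range : Int), Dom_other_items_within_range list item range → Pre_other_items_within_range list item range → Spec_other_items_within_range list item range (other_items_within_range list item range)

-- ===== LEMMAS AND PROOFS =====

-- A's append-if loop is filter-then-map.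
theorem pv_foldl_append_ite {α β : Type} (P : α → Prop) [DecidablePred P] (f : α → β)
    (l : List α) (acc : List β) :
    l.foldl (fun acc x => if P x then acc ++ [f x] else acc) acc
      = acc ++ (l.filter (fun x => decide (P x))).map f := by
  induction l generalizing acc with
  | nil => simp
  | cons x xs ih =>
    by_cases h : P x <;> simp [List.foldl_cons, h, ih]

-- map of pyGetD over an in-bounds-filtered range is a clamped drop/take.
theorem pv_map_pyGetD_filter_pyRange (xs : List Int) (a b : Int) (ha : 0 ≤ a) :
    ((PySem.List.pyRange a b 1).filter
        (fun i => decide (i < (xs.length : Int)))).map (fun i => PySem.List.pyGetD xs i 0)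
      = (xs.drop a.toNat).take (b - a).toNat := by
  by_cases hab : b ≤ a
  · have h0 : (b - a).toNat = 0 := by omega
    simp [PySem.List.pyRange_one_eq_nil hab, h0]
  · push_neg at hab
    have hk : (b - a).toNat = (b - (a + 1)).toNat + 1 := by omega
    rw [PySem.List.pyRange_one_cons hab]
    by_cases hn : a < (xs.length : Int)
    · have haN : a.toNat < xs.length := by omega
      have hget : PySem.List.pyGetD xs a 0 = xs[a.toNat] :=
        PySem.List.pyGetD_eq_getElem xs 0 ha hn
      rw [List.filter_cons_of_pos (by simpa using hn), List.map_cons, hget,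
        pv_map_pyGetD_filter_pyRange xs (a + 1) b (by omega), hk,
        List.drop_eq_getElem_cons haN, List.take_succ_cons]
      have h1 : (a + 1).toNat = a.toNat + 1 := by omega
      rw [h1]
    · push_neg at hn
      have hfil : ((a :: PySem.List.pyRange (a + 1) b 1).filter
          (fun i => decide (i < (xs.length : Int)))) = [] := by
        rw [List.filter_eq_nil_iff]
        intro i hi
        simp only [List.mem_cons, PySem.List.mem_pyRange_one] at hi
        simp only [decide_eq_true_eq, not_lt]
        rcases hi with rfl | ⟨h1, _⟩
        · exact hn
        · omega
      have hdrop : xs.drop a.toNat = [] :=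
        List.drop_eq_nil_of_le (by omega)
      simp [hfil, hdrop]
termination_by (b - a).toNat
decreasing_by omega

-- filtering a range by 0 ≤ i clamps its left end to 0.
theorem pv_filter_nonneg_pyRange (a b : Int) (hb : 0 ≤ b) :
    (PySem.List.pyRange a b 1).filter (fun i => decide (0 ≤ i))
      = PySem.List.pyRange (max 0 a) b 1 := by
  by_cases ha : 0 ≤ a
  · rw [List.filter_eq_self.mpr, max_eq_right ha]
    intro i hi
    rw [PySem.List.mem_pyRange_one] at hi
    simpa using le_trans ha hi.1
  · push_neg at ha
    rw [PySem.List.pyRange_one_append a 0 b (by omega) hb, List.filter_append]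
    have h1 : (PySem.List.pyRange a 0 1).filter (fun i => decide (0 ≤ i)) = [] := by
      rw [List.filter_eq_nil_iff]
      intro i hi
      rw [PySem.List.mem_pyRange_one] at hi
      simpa using hi.2
    have h2 : (PySem.List.pyRange 0 b 1).filter (fun i => decide (0 ≤ i))
        = PySem.List.pyRange 0 b 1 := by
      rw [List.filter_eq_self.mpr]
      intro i hi
      rw [PySem.List.mem_pyRange_one] at hi
      simpa using hi.1
    rw [h1, h2, max_eq_left (by omega)]
    simp

-- ===== VERDICT (by name: the statement is the Claim_ definition above) =====
theorem other_items_within_range_spec : Claim_equal_other_items_within_range := by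
  intro list item range _ hpre
  unfold Spec_other_items_within_range other_items_within_range other_items_within_range_alt
  obtain ⟨k, hk⟩ := (PySem.List.index?_isSome_iff list item).mpr hpre |> Option.isSome_iff_exists.mp
  rw [hk]
  simp only
  obtain ⟨hklt, -, -⟩ := PySem.List.getElem_of_index?_eq_some hk
  set n : Int := (list.length : Int) with hn
  have hkn : (k : Int) < n := by rw [hn]; exact_mod_cast hklt
  have hk0 : (0 : Int) ≤ (k : Int) := Int.natCast_nonneg k
  by_cases hr : range ≤ 0
  · rw [if_pos hr]
    -- A's loop range is empty (range < 0) or the single excluded index (range = 0)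
    rcases lt_or_eq_of_le hr with hlt | heq
    · rw [PySem.List.pyRange_one_eq_nil (by omega)]
      simp
    · subst heq
      rw [show (k : Int) - 0 = (k : Int) by ring, show (k : Int) + 0 + 1 = (k : Int) + 1 by ring,
        PySem.List.pyRange_one_singleton]
      simp
  · push_neg at hr
    rw [if_neg (by omega)]
    rw [pv_foldl_append_ite (fun i => 0 ≤ i ∧ i < n ∧ ¬ i = (k : Int))]
    rw [PySem.List.pyRange_one_append ((k : Int) - range) (k : Int) ((k : Int) + range + 1)
        (by omega) (by omega),
      PySem.List.pyRange_one_append (k : Int) ((k : Int) + 1) ((k : Int) + range + 1)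
        (by omega) (by omega),
      PySem.List.pyRange_one_singleton]
    rw [List.filter_append, List.filter_append, List.map_append, List.map_append]
    -- middle singleton is filtered out
    have hmid : ([(k : Int)].filter (fun i => decide (0 ≤ i ∧ i < n ∧ ¬ i = (k : Int)))) = [] := by
      simp
    -- left window: the predicate reduces to 0 ≤ i
    have hleft : ((PySem.List.pyRange ((k : Int) - range) (k : Int) 1).filter
        (fun i => decide (0 ≤ i ∧ i < n ∧ ¬ i = (k : Int))))
        = (PySem.List.pyRange (max 0 ((k : Int) - range)) (k : Int) 1).filter
            (fun i => decide (i < n)) := by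
      rw [List.filter_congr (q := fun i => decide (0 ≤ i))
          (by intro i hi; rw [PySem.List.mem_pyRange_one] at hi
              simp only [decide_eq_decide]; constructor
              · exact fun h => h.1
              · exact fun h => ⟨h, by omega, by omega⟩),
        pv_filter_nonneg_pyRange _ _ hk0,
        List.filter_eq_self.mpr]
      intro i hi
      rw [PySem.List.mem_pyRange_one] at hi
      simp only [decide_eq_true_eq]
      omega
    -- right window: the predicate reduces to i < n
    have hright : ((PySem.List.pyRange ((k : Int) + 1) ((k : Int) + range + 1) 1).filter
        (fun i => decide (0 ≤ i ∧ i < n ∧ ¬ i = (k : Int))))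
        = (PySem.List.pyRange ((k : Int) + 1) ((k : Int) + range + 1) 1).filter
            (fun i => decide (i < n)) := by
      apply List.filter_congr
      intro i hi
      rw [PySem.List.mem_pyRange_one] at hi
      simp only [decide_eq_decide]
      constructor
      · exact fun h => h.2.1
      · exact fun h => ⟨by omega, h, by omega⟩
    rw [hmid, hleft, hright,
      pv_map_pyGetD_filter_pyRange list (max 0 ((k : Int) - range)) (k : Int) (by omega),
      pv_map_pyGetD_filter_pyRange list ((k : Int) + 1) ((k : Int) + range + 1) (by omega)]
    -- identify B's lo with the clamped left end and both slices with drop/take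
    have hlo : (if (k : Int) - range < 0 then 0 else (k : Int) - range)
        = max 0 ((k : Int) - range) := by
      split_ifs with h <;> omega
    rw [hlo,
      PySem.List.slice_toNat list (by omega : (0:Int) ≤ max 0 ((k : Int) - range)) hk0,
      PySem.List.slice_toNat list (by omega : (0:Int) ≤ (k : Int) + 1) (by omega)]
    have e1 : ((k : Int) - max 0 ((k : Int) - range)).toNat
        = (k : Int).toNat - (max 0 ((k : Int) - range)).toNat := by omega
    have e2 : ((k : Int) + range + 1 - ((k : Int) + 1)).toNat
        = ((k : Int) + range + 1).toNat - ((k : Int) + 1).toNat := by omega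
    rw [e1, e2]
    simp
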